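-- pv_equiv track=rewrite | github.com/tcosmo/cdgp | cdgp/quadarithmetic.py | orderlex
-- ===== SOURCE A (Python) =====
-- def orderlex(l1, l2, n1, n2):
--     """ lexicographic order on infinite words, returns :
--     0 if the n1-th shift of l1^infty is smaller than the n2-th shift of l2^infty, 1 if it is larger, and 2 if the two words coincide
--     (this can be determined by looking only length(l1)+length(l2) letters since u^infty = v^infty iff uv = vu).
--     """
--     i = 0
--     while( (l1[(i+n1)%len(l1)] == l2[(i+n2)%len(l2)]) & (i <= (len(l1)+len(l2))) ):
--         i = i+1
--     if l1[(i+n1)%len(l1)] < l2[(i+n2)%len(l2)]: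
--         return 0
--     else:
--         if l1[(i+n1)%len(l1)] > l2[(i+n2)%len(l2)]:
--             return 1
--         else:
--             return 2
-- ===== SOURCE B (Python) =====
-- def orderlex(l1, l2, n1, n2):
--     L = len(l1) + len(l2)
--     w1 = [l1[(i + n1) % len(l1)] for i in range(L + 2)]
--     w2 = [l2[(i + n2) % len(l2)] for i in range(L + 2)]
--     return 0 if w1 < w2 else (1 if w1 > w2 else 2)
-- ===== Notes on version B (the rewrite author's own statement) =====
-- stated objective: idiomatic
-- what changed: Replaces the manual while-loop scan followed by a post-loop three-way test with materializing the two finite windows (length len(l1)+len(l2)+2) the loop can inspect and comparing them with Python's built-in lexicographic list comparison (C-level compare instead of an interpreted per-letter loop).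
import Mathlib
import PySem

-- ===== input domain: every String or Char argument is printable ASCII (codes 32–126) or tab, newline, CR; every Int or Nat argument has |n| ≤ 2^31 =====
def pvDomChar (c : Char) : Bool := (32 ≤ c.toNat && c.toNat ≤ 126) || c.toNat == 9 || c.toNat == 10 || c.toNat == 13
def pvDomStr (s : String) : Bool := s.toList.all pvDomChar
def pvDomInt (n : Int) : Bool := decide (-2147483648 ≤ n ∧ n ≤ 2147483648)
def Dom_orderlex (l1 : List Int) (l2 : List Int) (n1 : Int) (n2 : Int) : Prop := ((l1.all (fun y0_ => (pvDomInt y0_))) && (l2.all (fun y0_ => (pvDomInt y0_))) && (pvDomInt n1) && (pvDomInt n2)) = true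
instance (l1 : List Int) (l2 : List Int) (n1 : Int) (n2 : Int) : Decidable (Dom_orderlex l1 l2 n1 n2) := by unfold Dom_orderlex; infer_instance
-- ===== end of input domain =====

-- B replaces A's incremental scan-then-compare while-loop by materializing the two
-- finite windows the loop can inspect and three-way-comparing them lexicographically
-- (objective: more idiomatic decomposition; same O(len l1 + len l2) cost).

-- l[j % len(l)]  (Python floor mod; in-range for nonempty l, so the default is never used under Pre_)
def pvCyc (l : List Int) (j : Int) : Int :=
  (PySem.List.pyGet? l (PySem.Int.mod j l.length)).getD 0

-- ===== PORT A =====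
-- the while loop: runs while letters agree and i ≤ bound; fuel = bound + 2 suffices
def orderlexLoop (l1 l2 : List Int) (n1 n2 bound : Int) : Nat → Int → Int
  | 0, i => i
  | fuel + 1, i =>
      if pvCyc l1 (i + n1) = pvCyc l2 (i + n2) ∧ i ≤ bound then
        orderlexLoop l1 l2 n1 n2 bound fuel (i + 1)
      else i

def orderlex (l1 : List Int) (l2 : List Int) (n1 : Int) (n2 : Int) : Int :=
  let bound : Int := l1.length + l2.length
  let i := orderlexLoop l1 l2 n1 n2 bound (l1.length + l2.length + 2) 0
  if pvCyc l1 (i + n1) < pvCyc l2 (i + n2) then 0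
  else if pvCyc l1 (i + n1) > pvCyc l2 (i + n2) then 1
  else 2

-- ===== PORT B =====
-- Python's built-in lexicographic list comparison, as a three-way result 0/1/2
def pvCmp3 : List Int → List Int → Int
  | [], [] => 2
  | [], _ :: _ => 0
  | _ :: _, [] => 1
  | a :: as, b :: bs => if a < b then 0 else if b < a then 1 else pvCmp3 as bs

def pvWindow (l : List Int) (n : Int) (len : Nat) : List Int :=
  (List.range len).map (fun (i : Nat) => pvCyc l ((i : Int) + n))

def orderlex_alt (l1 : List Int) (l2 : List Int) (n1 : Int) (n2 : Int) : Int :=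
  let L := l1.length + l2.length
  pvCmp3 (pvWindow l1 n1 (L + 2)) (pvWindow l2 n2 (L + 2))

-- ===== PRECONDITION & SPEC =====
-- Pre_ excludes empty l1 or l2, on which Python A raises ZeroDivisionError (% 0); B raises there too.
def Pre_orderlex (l1 : List Int) (l2 : List Int) (n1 : Int) (n2 : Int) : Prop :=
  l1 ≠ [] ∧ l2 ≠ []
instance (l1 : List Int) (l2 : List Int) (n1 : Int) (n2 : Int) : Decidable (Pre_orderlex l1 l2 n1 n2) := by unfold Pre_orderlex; infer_instance

def pvWitness_orderlex : List Int × List Int × Int × Int := ([1, 2], [1, 3], 0, -1)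

def Spec_orderlex (l1 : List Int) (l2 : List Int) (n1 : Int) (n2 : Int) (out : Int) : Prop := out = orderlex_alt l1 l2 n1 n2
instance (l1 : List Int) (l2 : List Int) (n1 : Int) (n2 : Int) (out : Int) : Decidable (Spec_orderlex l1 l2 n1 n2 out) := by unfold Spec_orderlex; infer_instance

-- ===== CLAIM (what is proved, stated in full; the proofs are below) =====
def Claim_equal_orderlex : Prop := ∀ (l1 : List Int) (l2 : List Int) (n1 : Int) (n2 : Int), Dom_orderlex l1 l2 n1 n2 → Pre_orderlex l1 l2 n1 n2 → Spec_orderlex l1 l2 n1 n2 (orderlex l1 l2 n1 n2)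

-- ===== LEMMAS AND PROOFS =====

-- the scan-then-compare of A, starting at offset i with 'fuel' window letters left,
-- equals the three-way comparison of the two remaining windows
theorem orderlex_key (l1 l2 : List Int) (n1 n2 bound : Int) :
    ∀ (fuel : Nat) (i : Int), (i + fuel = bound + 2) → 1 ≤ fuel →
    (if pvCyc l1 (orderlexLoop l1 l2 n1 n2 bound fuel i + n1)
          < pvCyc l2 (orderlexLoop l1 l2 n1 n2 bound fuel i + n2) then (0 : Int)
     else if pvCyc l1 (orderlexLoop l1 l2 n1 n2 bound fuel i + n1)
          > pvCyc l2 (orderlexLoop l1 l2 n1 n2 bound fuel i + n2) then 1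
     else 2)
    = pvCmp3 ((List.range fuel).map fun (k : Nat) => pvCyc l1 ((k : Int) + i + n1))
             ((List.range fuel).map fun (k : Nat) => pvCyc l2 ((k : Int) + i + n2)) := by
  intro fuel
  induction fuel with
  | zero => intro i _ h1; omega
  | succ f ih =>
    intro i hsum _
    rw [List.range_succ_eq_map]
    simp only [List.map_cons, List.map_map, Int.natCast_zero, Int.zero_add]
    by_cases heq : pvCyc l1 (i + n1) = pvCyc l2 (i + n2)
    · rcases Nat.eq_zero_or_pos f with hf | hf
      · subst hf
        have hib : ¬ (i ≤ bound) := by omega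
        simp only [orderlexLoop, heq, hib, and_false, if_false, List.range_zero,
          List.map_nil]
        simp [pvCmp3]
      · have hib : i ≤ bound := by push_cast at hsum ⊢; omega
        have hrec := ih (i + 1) (by push_cast at hsum ⊢; omega) hf
        simp only [orderlexLoop, heq, hib, and_true, if_true]
        rw [hrec]
        simp only [pvCmp3, lt_irrefl, if_false]
        congr 1 <;>
          (apply List.map_congr_left; intro k _;
           simp only [Function.comp]; congr 1; push_cast; ring)
    · have hstop : orderlexLoop l1 l2 n1 n2 bound (f + 1) i = i := by
        simp [orderlexLoop, heq]
      simp only [hstop]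
      rcases lt_trichotomy (pvCyc l1 (i + n1)) (pvCyc l2 (i + n2)) with h | h | h
      · simp [pvCmp3, h]
      · exact absurd h heq
      · simp [pvCmp3, h, not_lt.mpr (le_of_lt h)]

theorem orderlex_spec' (l1 l2 : List Int) (n1 n2 : Int) :
    orderlex l1 l2 n1 n2 = orderlex_alt l1 l2 n1 n2 := by
  unfold orderlex orderlex_alt pvWindow
  have h := orderlex_key l1 l2 n1 n2 ((l1.length : Int) + l2.length)
      (l1.length + l2.length + 2) 0 (by push_cast; ring) (by omega)
  simp only [] at h ⊢
  rw [h]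
  simp only [add_zero]

-- ===== VERDICT (by name: the statement is the Claim_ definition above) =====
theorem orderlex_spec : Claim_equal_orderlex := by
  intro l1 l2 n1 n2 _ _
  exact orderlex_spec' l1 l2 n1 n2
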